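-- pv_equiv track=rewrite | github.com/TheAriuu/Run-Test | RunTest/Recursión.py | sumI
-- ===== SOURCE A (Python) =====
-- def sumI(n):
--     s1 = 0
--     for i in range(1,n+1):
--         s2=0
--         for j in range(i,i*i+1):
--             s2 += j+i
--         s1 += s2
--     return s1
-- ===== SOURCE B (Python) =====
-- def sumI(n):
--     s = 0
--     for i in range(1, n + 1):
--         s += (i**4 + i) // 2 + i**3 - i**2 + i
--     return s
-- ===== Notes on version B (the rewrite author's own statement) =====
-- stated objective: faster
-- what changed: replaces the quadratic inner loop summing j+i for j in range(i,i*i+1) by its closed-form arithmetic-series value per i, leaving a single O(n) loop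
import Mathlib
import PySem

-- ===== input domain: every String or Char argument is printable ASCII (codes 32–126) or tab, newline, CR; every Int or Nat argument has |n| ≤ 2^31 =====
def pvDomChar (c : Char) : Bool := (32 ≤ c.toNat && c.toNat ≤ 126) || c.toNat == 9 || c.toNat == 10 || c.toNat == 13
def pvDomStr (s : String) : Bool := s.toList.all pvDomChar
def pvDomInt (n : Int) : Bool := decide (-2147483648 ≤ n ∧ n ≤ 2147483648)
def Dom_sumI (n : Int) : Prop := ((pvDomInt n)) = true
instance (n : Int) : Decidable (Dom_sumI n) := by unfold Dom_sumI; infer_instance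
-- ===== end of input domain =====

-- B replaces A's quadratic inner loop by its closed-form value per i (faster: O(n) vs O(n^3)).

-- ===== PORT A =====
def sumI (n : Int) : Int :=
  (PySem.List.pyRange 1 (n + 1) 1).foldl
    (fun s1 i =>
      s1 + (PySem.List.pyRange i (i * i + 1) 1).foldl (fun s2 j => s2 + (j + i)) 0) 0

-- ===== PORT B =====
def sumI_alt (n : Int) : Int :=
  (PySem.List.pyRange 1 (n + 1) 1).foldl
    (fun s i => s + (PySem.Int.floordiv (i ^ 4 + i) 2 + i ^ 3 - i ^ 2 + i)) 0

-- ===== PRECONDITION & SPEC =====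
def Spec_sumI (n : Int) (out : Int) : Prop := out = sumI_alt n
instance (n : Int) (out : Int) : Decidable (Spec_sumI n out) := by unfold Spec_sumI; infer_instance

-- ===== CLAIM (what is proved, stated in full; the proofs are below) =====
def Claim_equal_sumI : Prop := ∀ (n : Int), Dom_sumI n → Spec_sumI n (sumI n)

-- ===== LEMMAS AND PROOFS =====

-- Sum of (c + k) over List.range m, doubled to avoid division.
theorem pv_range_sum (m : Nat) (c : Int) :
    2 * ((List.range m).map (fun (k : Nat) => c + (k : Int))).sum = 2 * m * c + m * (m - 1) := by
  induction m with
  | zero => simp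
  | succ m ih =>
    rw [List.range_succ, List.map_append, List.sum_append]
    push_cast
    push_cast at ih
    simp only [List.map, List.sum_cons, List.sum_nil]
    ring_nf
    ring_nf at ih
    omega

theorem pv_inner (i : Int) (hi : 1 ≤ i) :
    (PySem.List.pyRange i (i * i + 1) 1).foldl (fun s2 j => s2 + (j + i)) 0
      = PySem.Int.floordiv (i ^ 4 + i) 2 + i ^ 3 - i ^ 2 + i := by
  rw [PySem.List.foldl_add (g := fun j => j + i)]
  rw [PySem.List.pyRange_one, List.map_map]
  have hm : (i * i + 1 - i).toNat = (i * i + 1 - i) := by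
    have : 0 ≤ i * i + 1 - i := by nlinarith
    omega
  have h := pv_range_sum (i * i + 1 - i).toNat (i + i)
  have hfun : ((fun (j : Int) => j + i) ∘ fun (k : Nat) => i + (k : Int))
      = fun (k : Nat) => (i + i) + (k : Int) := by
    funext k
    simp [Function.comp]
    ring
  rw [hfun]
  rw [PySem.Int.floordiv_eq_ediv_of_pos (by norm_num)]
  rw [hm] at h
  have heven : (i ^ 4 + i) % 2 = 0 := by
    obtain ⟨k, hk⟩ := Int.even_mul_succ_self i
    have h4 : i ^ 4 + i = 2 * (k * (i ^ 2 - i + 1)) := by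
      have : i ^ 4 + i = (i * (i + 1)) * (i ^ 2 - i + 1) := by ring
      rw [this, hk]; ring
    omega
  have hgoal : 2 * ((i ^ 4 + i) / 2 + i ^ 3 - i ^ 2 + i)
      = 2 * (i * i + 1 - i) * (i + i) + (i * i + 1 - i) * (i * i + 1 - i - 1) := by
    have : 2 * ((i ^ 4 + i) / 2) = i ^ 4 + i := by omega
    nlinarith [this]
  omega

-- ===== VERDICT (by name: the statement is the Claim_ definition above) =====
theorem sumI_spec : Claim_equal_sumI := by
  intro n _
  unfold Spec_sumI sumI sumI_alt
  apply PySem.List.foldl_congr_mem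
  intro acc i hi
  rw [PySem.List.mem_pyRange_one] at hi
  rw [pv_inner i hi.1]
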